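-- pv_equiv track=rewrite | github.com/bobby285271/nonemast | src/nonemast/package_update.py | try_getting_corresponding_github_link
-- ===== SOURCE A (Python) =====
-- def try_getting_corresponding_github_link(url: str) -> str:
--     url = url.replace(
--         "https://gitlab.gnome.org/GNOME/",
--         "https://github.com/GNOME/",
--     )
--
--     for i in ["xfce", "thunar-plugins", "panel-plugins", "apps"]:
--         url = url.replace(
--             f"https://gitlab.xfce.org/{i}/",
--             "https://github.com/xfce-mirror/",
--         )
--
--     if "https://github.com/" in url:
--         url = url.replace("/-/", "/")
--         url = url.replace("...", "..")
--
--     return url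
-- ===== SOURCE B (Python) =====
-- PREFIXES = [
--     ("https://gitlab.gnome.org/GNOME/", "https://github.com/GNOME/"),
--     ("https://gitlab.xfce.org/xfce/", "https://github.com/xfce-mirror/"),
--     ("https://gitlab.xfce.org/thunar-plugins/", "https://github.com/xfce-mirror/"),
--     ("https://gitlab.xfce.org/panel-plugins/", "https://github.com/xfce-mirror/"),
--     ("https://gitlab.xfce.org/apps/", "https://github.com/xfce-mirror/"),
-- ]
--
-- CLEANUPS = [("/-/", "/"), ("...", "..")]
--
--
-- def _sub_all(table, s):
--     # One left-to-right scan replacing the first table entry that matches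
--     # at the current position (all patterns are non-empty).
--     out = []
--     i = 0
--     while i < len(s):
--         for old, new in table:
--             if s.startswith(old, i):
--                 out.append(new)
--                 i += len(old)
--                 break
--         else:
--             out.append(s[i])
--             i += 1
--     return "".join(out)
--
--
-- def try_getting_corresponding_github_link(url: str) -> str:
--     url = _sub_all(PREFIXES, url)
--     if "https://github.com/" in url:
--         url = _sub_all(CLEANUPS, url)
--     return url
-- ===== Notes on version B (the rewrite author's own statement) =====
-- stated objective: alternative
-- what changed: A rewrites the URL with six sequential str.replace passes (one per pattern); B makes a single left-to-right scan per phase over a (pattern, replacement) alternation table, substituting the first matching pattern at each position.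
import Mathlib
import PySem

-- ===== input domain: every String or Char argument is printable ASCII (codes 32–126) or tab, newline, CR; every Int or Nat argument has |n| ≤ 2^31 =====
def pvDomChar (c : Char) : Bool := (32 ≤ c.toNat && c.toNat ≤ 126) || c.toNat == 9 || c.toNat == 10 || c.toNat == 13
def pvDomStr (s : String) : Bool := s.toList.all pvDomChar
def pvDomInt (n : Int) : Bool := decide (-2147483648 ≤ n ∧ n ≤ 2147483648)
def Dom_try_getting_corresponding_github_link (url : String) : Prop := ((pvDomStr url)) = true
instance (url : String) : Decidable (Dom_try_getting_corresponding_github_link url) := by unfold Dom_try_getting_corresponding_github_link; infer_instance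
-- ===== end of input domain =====

-- B replaces A's six sequential str.replace passes by a single left-to-right scan with a
-- (pattern, replacement) table per phase (alternative algorithm, same results).

-- ===== PORT A =====
-- Literal transliteration of A: one .replace for the GNOME prefix, a for-loop of .replace
-- over the four xfce group names (the f-string becomes a list append), then the guarded
-- '/-/' and '...' cleanups.
def try_getting_corresponding_github_link (url : String) : String :=
  let u0 := PySem.Str.replace url "https://gitlab.gnome.org/GNOME/" "https://github.com/GNOME/"
  let u1 := ["xfce", "thunar-plugins", "panel-plugins", "apps"].foldl
    (fun u i =>
      PySem.Str.replace u
        (String.ofList ("https://gitlab.xfce.org/".toList ++ i.toList ++ "/".toList))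
        "https://github.com/xfce-mirror/") u0
  if PySem.Str.isIn "https://github.com/" u1 then
    PySem.Str.replace (PySem.Str.replace u1 "/-/" "/") "..." ".."
  else
    u1

-- ===== PORT B =====
-- B's tables (all patterns non-empty).
def pvTable1 : List (List Char × List Char) :=
  [("https://gitlab.gnome.org/GNOME/".toList, "https://github.com/GNOME/".toList),
   ("https://gitlab.xfce.org/xfce/".toList, "https://github.com/xfce-mirror/".toList),
   ("https://gitlab.xfce.org/thunar-plugins/".toList, "https://github.com/xfce-mirror/".toList),
   ("https://gitlab.xfce.org/panel-plugins/".toList, "https://github.com/xfce-mirror/".toList),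
   ("https://gitlab.xfce.org/apps/".toList, "https://github.com/xfce-mirror/".toList)]

def pvTable2 : List (List Char × List Char) :=
  [("/-/".toList, "/".toList), ("...".toList, "..".toList)]

-- B's _sub_all: one left-to-right scan; at each position the first matching table entry is
-- substituted (the for/break is the find?).  'i += len(old)' on l = c :: t is the drop of
-- old.length chars, written as t.drop (old.length - 1) (equal for the non-empty patterns
-- B uses, and makes termination structural).
def subAll (tbl : List (List Char × List Char)) : List Char → List Char
  | [] => []
  | c :: t =>
    match tbl.find? (fun e => e.1.isPrefixOf (c :: t)) with
    | some e => e.2 ++ subAll tbl (t.drop (e.1.length - 1))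
    | none => c :: subAll tbl t
termination_by l => l.length
decreasing_by
  · simp only [List.length_drop, List.length_cons]; omega
  · simp only [List.length_cons]; omega

def try_getting_corresponding_github_link_alt (url : String) : String :=
  let u := String.ofList (subAll pvTable1 url.toList)
  if PySem.Str.isIn "https://github.com/" u then
    String.ofList (subAll pvTable2 u.toList)
  else
    u

-- ===== PRECONDITION & SPEC =====
def Spec_try_getting_corresponding_github_link (url : String) (out : String) : Prop := out = try_getting_corresponding_github_link_alt url
instance (url : String) (out : String) : Decidable (Spec_try_getting_corresponding_github_link url out) := by unfold Spec_try_getting_corresponding_github_link; infer_instance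

-- ===== CLAIM (what is proved, stated in full; the proofs are below) =====
def Claim_equal_try_getting_corresponding_github_link : Prop := ∀ (url : String), Dom_try_getting_corresponding_github_link url → Spec_try_getting_corresponding_github_link url (try_getting_corresponding_github_link url)

-- ===== LEMMAS AND PROOFS =====

-- A single Python str.replace as a structural scan (proof-side model of Chars.replace).
def rep (old nw : List Char) : List Char → List Char
  | [] => []
  | c :: t =>
    if old.isPrefixOf (c :: t) then nw ++ rep old nw (t.drop (old.length - 1))
    else c :: rep old nw t
termination_by l => l.length
decreasing_by
  · simp only [List.length_drop, List.length_cons]; omega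
  · simp only [List.length_cons]; omega

-- A's sequence of replaces, as a fold over a table.
def chainReps (tbl : List (List Char × List Char)) (l : List Char) : List Char :=
  tbl.foldl (fun acc e => rep e.1 e.2 acc) l

-- Every non-empty suffix s of a is prefix-incompatible with q (neither is a prefix of the
-- other): no occurrence of q can start inside a block a, nor straddle its right edge.
def SuffCond (a q : List Char) : Prop :=
  ∀ s ∈ a.tails, s ≠ [] → ¬ q <+: s ∧ ¬ s <+: q

lemma rep_nil (old nw : List Char) : rep old nw [] = [] := by
  simp [rep]

lemma rep_cons_neg (old nw : List Char) (c : Char) (t : List Char)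
    (h : ¬ old <+: (c :: t)) : rep old nw (c :: t) = c :: rep old nw t := by
  rw [rep]
  simp [List.isPrefixOf_iff_prefix, h]

lemma rep_prefix_pos (old nw rest : List Char) (h : old ≠ []) :
    rep old nw (old ++ rest) = nw ++ rep old nw rest := by
  obtain ⟨d, p', rfl⟩ := List.exists_cons_of_ne_nil h
  rw [List.cons_append, rep]
  simp [List.isPrefixOf_iff_prefix]

lemma prefix_of_append_cases {q a x : List Char} (h : q <+: (a ++ x)) :
    q <+: a ∨ a <+: q :=
  List.prefix_or_prefix_of_prefix h (List.prefix_append a x)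

lemma suffCond_of_tail {c : Char} {a q : List Char} (h : SuffCond (c :: a) q) :
    SuffCond a q := by
  intro s hs hne
  exact h s (by rw [List.mem_tails] at hs ⊢; exact hs.trans (List.suffix_cons c a)) hne

lemma rep_append (p nw : List Char) (a x : List Char) (hS : SuffCond a p) :
    rep p nw (a ++ x) = a ++ rep p nw x := by
  induction a with
  | nil => simp
  | cons c a ih =>
    have hself := hS (c :: a) (by rw [List.mem_tails]) (by simp)
    have hnp : ¬ p <+: (c :: a) ++ x := by
      intro hcon
      rcases prefix_of_append_cases hcon with h | h
      · exact hself.1 h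
      · exact hself.2 h
    rw [List.cons_append] at hnp ⊢
    rw [rep_cons_neg _ _ _ _ hnp, ih (suffCond_of_tail hS)]
    simp

-- No new occurrence of (a suffix of) q at the head: if q's suffix s does not start at the
-- head of l, it does not start at the head of rep p r l either, provided the suffixes of q
-- are prefix-incompatible with the replacement r.
lemma noHead (p r q : List Char) (hp : p ≠ []) (hS : SuffCond q r) :
    ∀ l s, s ∈ q.tails → s ≠ [] → ¬ s <+: l → ¬ s <+: rep p r l := by
  intro l
  induction l with
  | nil =>
    intro s hsq hne hnl hcon
    rw [rep_nil] at hcon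
    exact hne (List.prefix_nil.mp hcon)
  | cons c t ih =>
    intro s hsq hne hnl hcon
    by_cases hm : p <+: (c :: t)
    · obtain ⟨rest, hrest⟩ := hm
      rw [← hrest, rep_prefix_pos _ _ _ hp] at hcon
      have hq := hS s hsq hne
      rcases prefix_of_append_cases hcon with h | h
      · exact hq.2 h
      · exact hq.1 h
    · rw [rep_cons_neg _ _ _ _ hm] at hcon
      match s, hcon with
      | c' :: s', hcon =>
        obtain ⟨hc, hs'⟩ := List.cons_prefix_cons.mp hcon
        rcases eq_or_ne s' [] with rfl | hs'ne
        · exact hnl (List.cons_prefix_cons.mpr ⟨hc, List.nil_prefix⟩)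
        · have hs'q : s' ∈ q.tails := by
            rw [List.mem_tails] at hsq ⊢
            exact (List.suffix_cons c' s').trans hsq
          have hnt : ¬ s' <+: t := by
            intro hcon2
            exact hnl (List.cons_prefix_cons.mpr ⟨hc, hcon2⟩)
          exact ih s' hs'q hs'ne hnt hs'

lemma chain_nil (tbl : List (List Char × List Char)) : chainReps tbl [] = [] := by
  induction tbl with
  | nil => rfl
  | cons e es ih =>
    simp only [chainReps, List.foldl_cons, rep_nil] at *
    exact ih

lemma chain_append (tbl : List (List Char × List Char)) (a x : List Char)
    (h : ∀ e ∈ tbl, SuffCond a e.1) :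
    chainReps tbl (a ++ x) = a ++ chainReps tbl x := by
  induction tbl generalizing x with
  | nil => rfl
  | cons e es ih =>
    simp only [chainReps, List.foldl_cons]
    rw [rep_append _ _ _ _ (h e (by simp))]
    exact ih _ (fun e' he' => h e' (by simp [he']))

lemma chain_cons (tbl : List (List Char × List Char))
    (H1 : ∀ e ∈ tbl, e.1 ≠ [])
    (HP : tbl.Pairwise (fun e e' => SuffCond e'.1 e.2))
    (c : Char) (X : List Char)
    (Hno : ∀ e ∈ tbl, ¬ e.1 <+: (c :: X)) :
    chainReps tbl (c :: X) = c :: chainReps tbl X := by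
  induction tbl generalizing X with
  | nil => rfl
  | cons e es ih =>
    have h1 : ¬ e.1 <+: (c :: X) := Hno e (by simp)
    simp only [chainReps, List.foldl_cons]
    rw [rep_cons_neg _ _ _ _ h1]
    rw [List.pairwise_cons] at HP
    refine ih (fun e' he' => H1 e' (by simp [he'])) HP.2 _ (fun e' he' => ?_)
    have hnh := noHead e.1 e.2 e'.1 (H1 e (by simp)) (HP.1 e' he') (c :: X) e'.1
      (by rw [List.mem_tails]) (H1 e' (by simp [he'])) (Hno e' (by simp [he']))
    rwa [rep_cons_neg _ _ _ _ h1] at hnh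

-- The table conditions: for an earlier entry e and a later entry e',
-- suffixes of e'.1 are incompatible with e.1 (patterns never overlap),
-- suffixes of e.2 are incompatible with e'.1 (a later pattern never starts inside or
-- straddles an emitted replacement), and suffixes of e'.1 are incompatible with e.2
-- (an earlier replace never creates a later pattern at a scanned position).
def GoodTbl (tbl : List (List Char × List Char)) : Prop :=
  (∀ e ∈ tbl, e.1 ≠ []) ∧
  tbl.Pairwise (fun e e' => SuffCond e'.1 e.1 ∧ SuffCond e.2 e'.1 ∧ SuffCond e'.1 e.2)

-- Main lemma: A's sequential replace passes compute B's single simultaneous scan.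
lemma chain_eq_subAll (tbl : List (List Char × List Char)) (H : GoodTbl tbl) :
    ∀ l, chainReps tbl l = subAll tbl l := by
  obtain ⟨H1, HP⟩ := H
  have key : ∀ n l, l.length ≤ n → chainReps tbl l = subAll tbl l := by
    intro n
    induction n with
    | zero =>
      intro l hl
      have : l = [] := List.eq_nil_of_length_eq_zero (Nat.le_zero.mp hl)
      subst this
      rw [chain_nil, subAll]
    | succ n ihn =>
      intro l hl
      match hfind : tbl.find? (fun e => e.1.isPrefixOf l) with
      | none =>
        rw [List.find?_eq_none] at hfind
        match l with
        | [] => rw [chain_nil, subAll]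
        | c :: t =>
          have hno : ∀ e ∈ tbl, ¬ e.1 <+: (c :: t) := by
            intro e he hcon
            exact hfind e he (by rw [List.isPrefixOf_iff_prefix]; exact hcon)
          rw [chain_cons tbl H1 (HP.imp (fun h => h.2.2)) c t hno, subAll]
          have : tbl.find? (fun e => e.1.isPrefixOf (c :: t)) = none := by
            rw [List.find?_eq_none]
            intro e he
            simp [List.isPrefixOf_iff_prefix]
            exact hno e he
          rw [this]
          simp only [List.cons.injEq, true_and]
          exact ihn t (by simpa using Nat.le_of_succ_le_succ hl)
      | some ek =>
        rw [List.find?_eq_some_iff_append] at hfind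
        obtain ⟨hpre, T1, T2, htbl, hT1⟩ := hfind
        rw [List.isPrefixOf_iff_prefix] at hpre
        obtain ⟨rest, hrest⟩ := hpre
        have hkne : ek.1 ≠ [] := H1 ek (by rw [htbl]; simp)
        -- pairwise facts
        have hpair := htbl ▸ HP
        rw [List.pairwise_append] at hpair
        obtain ⟨_, hpair2, hcross⟩ := hpair
        rw [List.pairwise_cons] at hpair2
        -- chain side
        have hchain : chainReps tbl l = ek.2 ++ chainReps tbl rest := by
          rw [htbl, ← hrest]
          show chainReps (T1 ++ ek :: T2) (ek.1 ++ rest) = _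
          have hsplit : ∀ z, chainReps (T1 ++ ek :: T2) z
              = chainReps T2 (rep ek.1 ek.2 (chainReps T1 z)) := by
            intro z
            simp [chainReps, List.foldl_append]
          rw [hsplit, hsplit]
          rw [chain_append T1 _ _ (fun e he => (hcross e he ek (by simp)).1)]
          rw [rep_prefix_pos _ _ _ hkne]
          rw [chain_append T2 _ _ (fun e he => (hpair2.1 e he).2.1)]
        -- subAll side
        have hsub : subAll tbl l = ek.2 ++ subAll tbl rest := by
          obtain ⟨d, p', hd⟩ := List.exists_cons_of_ne_nil hkne
          have hl' : l = d :: (p' ++ rest) := by rw [← hrest, hd, List.cons_append]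
          rw [hl'] at hT1
          rw [hl', subAll]
          have : tbl.find? (fun e => e.1.isPrefixOf (d :: (p' ++ rest))) = some ek := by
            rw [List.find?_eq_some_iff_append]
            refine ⟨?_, T1, T2, htbl, hT1⟩
            rw [List.isPrefixOf_iff_prefix, hd, ← List.cons_append]
            exact List.prefix_append _ _
          rw [this]
          simp [hd]
        rw [hchain, hsub]
        have hlen : rest.length ≤ n := by
          have : l.length = ek.1.length + rest.length := by rw [← hrest]; simp
          have hk1 : 0 < ek.1.length := List.length_pos_of_ne_nil hkne
          omega
        rw [ihn rest hlen]
  intro l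
  exact key l.length l le_rfl

-- Chars.replace (with a non-empty pattern) is the structural scan rep.
lemma replace_go_spec (old nw : List Char) (hold : old ≠ []) :
    ∀ fuel l acc, l.length ≤ fuel →
      PySem.Chars.replace.go old nw fuel l acc = acc.reverse ++ rep old nw l := by
  intro fuel
  induction fuel with
  | zero =>
    intro l acc hl
    have : l = [] := List.eq_nil_of_length_eq_zero (Nat.le_zero.mp hl)
    subst this
    simp [PySem.Chars.replace.go, rep_nil]
  | succ n ihn =>
    intro l acc hl
    match l with
    | [] =>
      simp [PySem.Chars.replace.go, rep_nil]
    | c :: t =>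
      rw [PySem.Chars.replace.go]
      by_cases hm : old <+: (c :: t)
      · have hmb : old.isPrefixOf (c :: t) = true := List.isPrefixOf_iff_prefix.mpr hm
        rw [hmb]
        simp only [if_true]
        obtain ⟨d, p', hd⟩ := List.exists_cons_of_ne_nil hold
        have hdrop : (c :: t).drop old.length = t.drop (old.length - 1) := by
          rw [hd]; simp
        have hlen : ((c :: t).drop old.length).length ≤ n := by
          rw [List.length_drop, hd]
          simp at hl ⊢
          omega
        have hrep : rep old nw (c :: t) = nw ++ rep old nw (t.drop (old.length - 1)) := by
          rw [rep]
          simp [List.isPrefixOf_iff_prefix, hm]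
        rw [ihn _ _ hlen, hdrop, hrep]
        simp
      · have hmb : old.isPrefixOf (c :: t) = false := by
          rw [Bool.eq_false_iff]
          intro hcon
          exact hm (List.isPrefixOf_iff_prefix.mp hcon)
        rw [hmb]
        simp only [Bool.false_eq_true, if_false]
        have hlen : t.length ≤ n := by simp at hl; omega
        rw [ihn _ _ hlen, rep_cons_neg _ _ _ _ hm]
        simp

lemma replace_eq_rep (l old nw : List Char) (hold : old ≠ []) :
    PySem.Chars.replace l old nw = rep old nw l := by
  rw [PySem.Chars.replace]
  have : old.isEmpty = false := by
    cases old with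
    | nil => exact absurd rfl hold
    | cons _ _ => rfl
  rw [this]
  simp only [Bool.false_eq_true, if_false]
  rw [replace_go_spec old nw hold l.length l [] le_rfl]
  simp

set_option maxHeartbeats 2000000 in
lemma goodTbl1 : GoodTbl pvTable1 := by
  unfold GoodTbl SuffCond
  constructor
  · decide
  · decide

set_option maxHeartbeats 400000 in
lemma goodTbl2 : GoodTbl pvTable2 := by
  unfold GoodTbl SuffCond
  constructor
  · decide
  · decide

set_option maxHeartbeats 1000000 in
-- Phase 1: A's five replaces = B's first scan (at the character-list level).
lemma phase1 (l : List Char) :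
    PySem.Chars.replace
      (PySem.Chars.replace
        (PySem.Chars.replace
          (PySem.Chars.replace
            (PySem.Chars.replace l
              "https://gitlab.gnome.org/GNOME/".toList "https://github.com/GNOME/".toList)
            "https://gitlab.xfce.org/xfce/".toList "https://github.com/xfce-mirror/".toList)
          "https://gitlab.xfce.org/thunar-plugins/".toList "https://github.com/xfce-mirror/".toList)
        "https://gitlab.xfce.org/panel-plugins/".toList "https://github.com/xfce-mirror/".toList)
      "https://gitlab.xfce.org/apps/".toList "https://github.com/xfce-mirror/".toList
    = subAll pvTable1 l := by
  rw [← chain_eq_subAll pvTable1 goodTbl1 l]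
  simp only [chainReps, pvTable1, List.foldl_cons, List.foldl_nil]
  rw [replace_eq_rep _ _ _ (by decide), replace_eq_rep _ _ _ (by decide),
      replace_eq_rep _ _ _ (by decide), replace_eq_rep _ _ _ (by decide),
      replace_eq_rep _ _ _ (by decide)]

set_option maxHeartbeats 1000000 in
-- Phase 2: A's two cleanup replaces = B's second scan.
lemma phase2 (l : List Char) :
    PySem.Chars.replace (PySem.Chars.replace l "/-/".toList "/".toList)
      "...".toList "..".toList = subAll pvTable2 l := by
  rw [← chain_eq_subAll pvTable2 goodTbl2 l]
  simp only [chainReps, pvTable2, List.foldl_cons, List.foldl_nil]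
  rw [replace_eq_rep _ _ _ (by decide), replace_eq_rep _ _ _ (by decide)]

set_option maxHeartbeats 4000000 in
-- ===== VERDICT (by name: the statement is the Claim_ definition above) =====
theorem try_getting_corresponding_github_link_spec : Claim_equal_try_getting_corresponding_github_link := by
  intro url _
  unfold Spec_try_getting_corresponding_github_link
  unfold try_getting_corresponding_github_link try_getting_corresponding_github_link_alt
  simp only [List.foldl_cons, List.foldl_nil]
  -- the f-string patterns are the table's literal patterns
  rw [(by decide : String.ofList ("https://gitlab.xfce.org/".toList ++ "xfce".toList ++ "/".toList)
        = "https://gitlab.xfce.org/xfce/"),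
      (by decide : String.ofList ("https://gitlab.xfce.org/".toList ++ "thunar-plugins".toList ++ "/".toList)
        = "https://gitlab.xfce.org/thunar-plugins/"),
      (by decide : String.ofList ("https://gitlab.xfce.org/".toList ++ "panel-plugins".toList ++ "/".toList)
        = "https://gitlab.xfce.org/panel-plugins/"),
      (by decide : String.ofList ("https://gitlab.xfce.org/".toList ++ "apps".toList ++ "/".toList)
        = "https://gitlab.xfce.org/apps/")]
  -- the intermediate strings of the two ports coincide
  have hmid :
      PySem.Str.replace
        (PySem.Str.replace
          (PySem.Str.replace
            (PySem.Str.replace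
              (PySem.Str.replace url "https://gitlab.gnome.org/GNOME/" "https://github.com/GNOME/")
              "https://gitlab.xfce.org/xfce/" "https://github.com/xfce-mirror/")
            "https://gitlab.xfce.org/thunar-plugins/" "https://github.com/xfce-mirror/")
          "https://gitlab.xfce.org/panel-plugins/" "https://github.com/xfce-mirror/")
        "https://gitlab.xfce.org/apps/" "https://github.com/xfce-mirror/"
      = String.ofList (subAll pvTable1 url.toList) := by
    have h' :
        (PySem.Str.replace
          (PySem.Str.replace
            (PySem.Str.replace
              (PySem.Str.replace
                (PySem.Str.replace url "https://gitlab.gnome.org/GNOME/" "https://github.com/GNOME/")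
                "https://gitlab.xfce.org/xfce/" "https://github.com/xfce-mirror/")
              "https://gitlab.xfce.org/thunar-plugins/" "https://github.com/xfce-mirror/")
            "https://gitlab.xfce.org/panel-plugins/" "https://github.com/xfce-mirror/")
          "https://gitlab.xfce.org/apps/" "https://github.com/xfce-mirror/").toList
        = subAll pvTable1 url.toList := by
      simp only [PySem.Str.toList_replace]
      exact phase1 url.toList
    rw [← h', String.ofList_toList]
  rw [hmid]
  by_cases hguard : PySem.Str.isIn "https://github.com/" (String.ofList (subAll pvTable1 url.toList)) = true
  · rw [if_pos hguard, if_pos hguard]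
    have h2' :
        (PySem.Str.replace
          (PySem.Str.replace (String.ofList (subAll pvTable1 url.toList)) "/-/" "/")
          "..." "..").toList
        = subAll pvTable2 (String.ofList (subAll pvTable1 url.toList)).toList := by
      simp only [PySem.Str.toList_replace]
      exact phase2 _
    rw [← h2', String.ofList_toList]
  · rw [if_neg hguard, if_neg hguard]
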